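-- pv_equiv track=rewrite | github.com/Shimwell/paramak-2 | src/paramak/utils.py | sum_up_to_gap_before_plasma
-- ===== SOURCE A (Python) =====
-- def sum_up_to_gap_before_plasma(radial_build):
--     total_sum = 0
--     for i, item in enumerate(radial_build):
--         if item[0] == "plasma":
--             return total_sum
--         if item[0] == "gap" and i + 1 < len(radial_build) and radial_build[i + 1][0] == "plasma":
--             return total_sum
--         total_sum += item[1]
--     return total_sum
-- ===== SOURCE B (Python) =====
-- def sum_up_to_gap_before_plasma(radial_build):
--     names = [name for name, _ in radial_build]
--     try:
--         stop = names.index("plasma")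
--         if stop and names[stop - 1] == "gap":
--             stop -= 1
--     except ValueError:
--         stop = len(radial_build)
--     return sum(width for _, width in radial_build[:stop])
-- ===== Notes on version B (the rewrite author's own statement) =====
-- stated objective: alternative
-- what changed: Instead of A's fused loop that accumulates widths while testing each element (including a look-ahead gap-before-plasma test), B locates the first 'plasma' by a single index() search, looks one step BACK to see if a 'gap' precedes it, and then sums the prefix of widths before that stop point.
import Mathlib
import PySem

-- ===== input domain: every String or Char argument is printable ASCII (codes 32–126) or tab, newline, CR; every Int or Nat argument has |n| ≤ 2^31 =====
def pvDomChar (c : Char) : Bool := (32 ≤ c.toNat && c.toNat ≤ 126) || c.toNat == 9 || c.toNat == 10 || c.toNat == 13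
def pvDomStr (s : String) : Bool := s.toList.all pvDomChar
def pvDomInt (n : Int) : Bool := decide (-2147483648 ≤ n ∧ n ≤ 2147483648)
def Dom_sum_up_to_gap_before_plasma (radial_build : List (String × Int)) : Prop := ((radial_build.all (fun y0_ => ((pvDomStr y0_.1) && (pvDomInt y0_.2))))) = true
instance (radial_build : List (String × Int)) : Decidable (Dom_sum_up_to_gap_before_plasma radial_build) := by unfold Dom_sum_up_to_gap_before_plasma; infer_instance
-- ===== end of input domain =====

-- B replaces A's fused accumulate-and-test loop (with per-element look-AHEAD) by an index() search
-- for the first "plasma", one look-BACK for a preceding "gap", and a prefix sum; same O(n) cost.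

-- ===== PORT A =====
-- Port of A: enumerate loop, running total, early return on "plasma" or on "gap" immediately before "plasma".
def pvGoA (rb : List (String × Int)) : Int → Nat → List (String × Int) → Int
  | acc, _, [] => acc
  | acc, i, (name, w) :: rest =>
    if name == "plasma" then acc
    else if name == "gap" && decide (i + 1 < rb.length)
           && ((PySem.List.pyGet? rb ((i : Int) + 1)).map Prod.fst == some "plasma") then acc
    else pvGoA rb (acc + w) (i + 1) rest

def sum_up_to_gap_before_plasma (radial_build : List (String × Int)) : Int :=
  pvGoA radial_build 0 0 radial_build

-- ===== PORT B =====
-- Port of B: names.index("plasma") (none = ValueError branch → stop = len), look back one step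
-- for a "gap", then sum the widths of the prefix before the stop point.
def pvStopB (rb : List (String × Int)) (names : List String) : Nat :=
  match PySem.List.index? names "plasma" with
  | some p =>
      if (decide (0 < p) && ((PySem.List.pyGet? names ((p : Int) - 1)) == some "gap")) then p - 1 else p
  | none => rb.length

def sum_up_to_gap_before_plasma_alt (radial_build : List (String × Int)) : Int :=
  let names := radial_build.map Prod.fst
  ((radial_build.take (pvStopB radial_build names)).map Prod.snd).sum

-- ===== PRECONDITION & SPEC =====
def Spec_sum_up_to_gap_before_plasma (radial_build : List (String × Int)) (out : Int) : Prop := out = sum_up_to_gap_before_plasma_alt radial_build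
instance (radial_build : List (String × Int)) (out : Int) : Decidable (Spec_sum_up_to_gap_before_plasma radial_build out) := by unfold Spec_sum_up_to_gap_before_plasma; infer_instance

-- ===== CLAIM =====
def Claim_equal_sum_up_to_gap_before_plasma : Prop := ∀ (radial_build : List (String × Int)), Dom_sum_up_to_gap_before_plasma radial_build → Spec_sum_up_to_gap_before_plasma radial_build (sum_up_to_gap_before_plasma radial_build)

-- ===== LEMMAS AND PROOFS =====

-- A as a pure structural function on the remaining suffix (no index bookkeeping).
def pvFA : List (String × Int) → Int
  | [] => 0
  | (name, w) :: rest =>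
    if name = "plasma" then 0
    else if name = "gap" ∧ (rest.head?.map Prod.fst = some "plasma") then 0
    else w + pvFA rest

theorem pvGoA_eq_pvFA (rb : List (String × Int)) :
    ∀ (rest : List (String × Int)) (i : Nat) (acc : Int), rb.drop i = rest →
      pvGoA rb acc i rest = acc + pvFA rest := by
  intro rest
  induction rest with
  | nil => intro i acc _; simp [pvGoA, pvFA]
  | cons hd tl ih =>
    intro i acc hdrop
    obtain ⟨name, w⟩ := hd
    have hdt : rb.drop (i + 1) = tl := by
      have := congrArg (List.drop 1) hdrop
      simpa [List.drop_drop, Nat.add_comm] using this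
    have hnext : PySem.List.pyGet? rb ((i : Int) + 1) = tl.head? := by
      have h1 : ((i : Int) + 1) = ((i + 1 : Nat) : Int) := by push_cast; ring
      rw [h1, PySem.List.pyGet?_natCast, ← List.head?_drop, hdt]
    have hlen : i + 1 < rb.length ↔ tl ≠ [] := by
      constructor
      · intro h hnil
        rw [hnil] at hdt
        have := List.drop_eq_nil_iff.mp hdt
        omega
      · intro h
        by_contra hle
        exact h (hdt ▸ List.drop_eq_nil_of_le (by omega))
    simp only [pvGoA, hnext]
    by_cases hp : name = "plasma"
    · simp [hp, pvFA]
    · by_cases hg : name = "gap" ∧ (tl.head?.map Prod.fst = some "plasma")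
      · have htl : tl ≠ [] := by
          intro hnil; rw [hnil] at hg; simp at hg
        have hfa : pvFA ((name, w) :: tl) = 0 := by
          simp only [pvFA]; rw [if_neg hp, if_pos hg]
        simp only [hg.1] at hfa ⊢
        simp [hg.2, hlen.mpr htl, hfa]
      · have hfa : pvFA ((name, w) :: tl) = w + pvFA tl := by
          simp only [pvFA]; rw [if_neg hp, if_neg hg]
        have hcond : (name == "gap" && decide (i + 1 < rb.length)
             && ((tl.head?.map Prod.fst) == some "plasma")) = false := by
          by_cases h1 : name = "gap"
          · by_cases h2 : tl.head?.map Prod.fst = some "plasma"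
            · exact absurd ⟨h1, h2⟩ hg
            · simp [h2]
          · simp [h1]
        rw [ih (i + 1) (acc + w) hdt]
        simp [hp, hcond, hfa, add_assoc]

theorem pvFA_eq_alt (l : List (String × Int)) :
    pvFA l = ((l.take (pvStopB l (l.map Prod.fst))).map Prod.snd).sum := by
  induction l with
  | nil => simp [pvFA, pvStopB, PySem.List.index?]
  | cons hd tl ih =>
    obtain ⟨name, w⟩ := hd
    by_cases hp : name = "plasma"
    · subst hp
      have h0 : PySem.List.index? ("plasma" :: tl.map Prod.fst) "plasma" = some 0 :=
        PySem.List.index?_cons_self "plasma" (tl.map Prod.fst)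
      have hs : pvStopB (("plasma", w) :: tl) ((("plasma", w) :: tl).map Prod.fst) = 0 := by
        simp only [List.map_cons]
        unfold pvStopB
        rw [h0]
        simp
      rw [hs]
      simp [pvFA]
    · have hidx : PySem.List.index? (name :: tl.map Prod.fst) "plasma"
          = (PySem.List.index? (tl.map Prod.fst) "plasma").map (· + 1) :=
        PySem.List.index?_cons_of_ne (tl.map Prod.fst) hp
      by_cases hg : name = "gap" ∧ (tl.head?.map Prod.fst = some "plasma")
      · -- first plasma is at index 1, preceded by a gap: stop = 0
        obtain ⟨x, xs, htl, hx1⟩ : ∃ x xs, tl = x :: xs ∧ x.1 = "plasma" := by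
          cases tl with
          | nil => simp at hg
          | cons x xs =>
            refine ⟨x, xs, rfl, ?_⟩
            have := hg.2; simpa using this
        subst htl
        have h1 : PySem.List.index? (x.1 :: xs.map Prod.fst) "plasma" = some 0 := by
          rw [hx1]; exact PySem.List.index?_cons_self "plasma" (xs.map Prod.fst)
        have hs : pvStopB ((name, w) :: x :: xs) (((name, w) :: x :: xs).map Prod.fst) = 0 := by
          simp only [List.map_cons]
          unfold pvStopB
          simp only [List.map_cons] at hidx
          rw [hidx, h1, Option.map_some]
          show (if (decide (0 < 0 + 1) && PySem.List.pyGet? (name :: x.1 :: xs.map Prod.fst)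
                  (((0 + 1 : Nat) : Int) - 1) == some "gap") = true then 0 + 1 - 1 else 0 + 1) = 0
          have hz : ((0 + 1 : Nat) : Int) - 1 = ((0 : Nat) : Int) := by norm_num
          have hgn : PySem.List.pyGet? (name :: x.1 :: xs.map Prod.fst) (((0 + 1 : Nat) : Int) - 1)
              = some name := by
            rw [hz, PySem.List.pyGet?_natCast]; rfl
          rw [hgn]
          simp [hg.1]
        rw [hs]
        have hfa : pvFA ((name, w) :: x :: xs) = 0 := by
          simp only [pvFA]; rw [if_neg hp, if_pos (by simpa using hg)]
        simpa using hfa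
      · have hfa : pvFA ((name, w) :: tl) = w + pvFA tl := by
          simp only [pvFA]; rw [if_neg hp, if_neg hg]
        rw [hfa, ih]
        cases hfind : PySem.List.index? (tl.map Prod.fst) "plasma" with
        | none =>
          have hsl : pvStopB tl (tl.map Prod.fst) = tl.length := by
            unfold pvStopB; rw [hfind]
          have hsc : pvStopB ((name, w) :: tl) (((name, w) :: tl).map Prod.fst)
              = tl.length + 1 := by
            simp only [List.map_cons]
            unfold pvStopB
            rw [hidx, hfind]
            simp
          rw [hsl, hsc]
          simp [List.take_of_length_le]
        | some p =>
          have hstop : pvStopB ((name, w) :: tl) (((name, w) :: tl).map Prod.fst)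
              = pvStopB tl (tl.map Prod.fst) + 1 := by
            simp only [List.map_cons]
            unfold pvStopB
            rw [hidx, hfind, Option.map_some]
            show (if (decide (0 < p + 1) && PySem.List.pyGet? (name :: tl.map Prod.fst)
                    (((p + 1 : Nat) : Int) - 1) == some "gap") = true then p + 1 - 1 else p + 1)
                = (if (decide (0 < p) && PySem.List.pyGet? (tl.map Prod.fst)
                    (((p : Nat) : Int) - 1) == some "gap") = true then p - 1 else p) + 1
            by_cases hp0 : 0 < p
            · have hc1 : (((p + 1 : Nat)) : Int) - 1 = ((p : Nat) : Int) := by push_cast; ring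
              have hget1 : PySem.List.pyGet? (name :: tl.map Prod.fst) ((((p + 1 : Nat)) : Int) - 1)
                  = (tl.map Prod.fst)[p - 1]? := by
                rw [hc1, PySem.List.pyGet?_natCast]
                have hsplit : p = (p - 1) + 1 := by omega
                rw [hsplit]
                simp
              have hget2 : PySem.List.pyGet? (tl.map Prod.fst) (((p : Nat) : Int) - 1)
                  = (tl.map Prod.fst)[p - 1]? := by
                have hc2 : ((p : Nat) : Int) - 1 = (((p - 1 : Nat)) : Int) := by
                  push_cast [hp0]; omega
                rw [hc2, PySem.List.pyGet?_natCast]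
              rw [hget1, hget2]
              by_cases hgap : (tl.map Prod.fst)[p - 1]? = some "gap"
              · simp [hgap, hp0]; omega
              · have hb : (((tl.map Prod.fst)[p - 1]?) == some "gap") = false := by
                  simpa using hgap
                rw [hb]
                simp
            · have hp' : p = 0 := by omega
              subst hp'
              have hg0 : PySem.List.pyGet? (name :: tl.map Prod.fst) (((0 + 1 : Nat) : Int) - 1)
                  = some name := by
                have hz : ((0 + 1 : Nat) : Int) - 1 = ((0 : Nat) : Int) := by norm_num
                rw [hz, PySem.List.pyGet?_natCast]; rfl
              have hhd : tl.head?.map Prod.fst = some "plasma" := by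
                obtain ⟨hlt, hv, _⟩ := PySem.List.getElem_of_index?_eq_some hfind
                cases tl with
                | nil => simp at hlt
                | cons x xs => simpa using hv
              have hng : name ≠ "gap" := fun h => hg ⟨h, hhd⟩
              rw [hg0]
              simp [hng]
          rw [hstop, List.take_succ_cons]
          simp

-- ===== VERDICT =====
theorem sum_up_to_gap_before_plasma_spec : Claim_equal_sum_up_to_gap_before_plasma := by
  intro rb _
  unfold Spec_sum_up_to_gap_before_plasma sum_up_to_gap_before_plasma sum_up_to_gap_before_plasma_alt
  rw [pvGoA_eq_pvFA rb rb 0 0 (by simp), pvFA_eq_alt]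
  simp
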